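-- pv_equiv track=rewrite | github.com/macginitie/mims | mip.py | auto_crosshatch
-- ===== SOURCE A (Python) =====
-- white = 255, 255, 255
--
-- black = 0, 0, 0
--
-- def sum_channels(pixel):
--     return pixel[0] + pixel[1] + pixel[2]
--
-- def diag_stripe(x, y, modulus):
--     if (x - y // 2) % modulus == 0:
--         return black
--     return white
--
-- def auto_crosshatch(pixel, x, y, paramlist=[]):
--     sumchan = sum_channels(pixel)
--     if sumchan < 50:
--         return black
--     modulus = 2
--     thresholds = [100, 150, 200, 250, 300, 350, 400, 450, 500, 550]
--     for thr in thresholds: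
--         if sumchan < thr:
--             return diag_stripe(x, y, modulus)
--         modulus += 2
--     return white
-- ===== SOURCE B (Python) =====
-- white = 255, 255, 255
--
-- black = 0, 0, 0
--
-- def diag_stripe(x, y, modulus):
--     if (x - y // 2) % modulus == 0:
--         return black
--     return white
--
-- def auto_crosshatch(pixel, x, y, paramlist=[]):
--     sumchan = pixel[0] + pixel[1] + pixel[2]
--     if sumchan < 50:
--         return black
--     if sumchan >= 550:
--         return white
--     return diag_stripe(x, y, 2 + 2 * ((sumchan - 50) // 50))
-- ===== Notes on version B (the rewrite author's own statement) =====
-- stated objective: simpler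
-- what changed: The threshold list and running-modulus loop are replaced by a direct arithmetic bucket: B returns black below 50, white at or above 550, and otherwise computes the modulus as 2 + 2*((sumchan-50)//50) with no loop or list.
import Mathlib
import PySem

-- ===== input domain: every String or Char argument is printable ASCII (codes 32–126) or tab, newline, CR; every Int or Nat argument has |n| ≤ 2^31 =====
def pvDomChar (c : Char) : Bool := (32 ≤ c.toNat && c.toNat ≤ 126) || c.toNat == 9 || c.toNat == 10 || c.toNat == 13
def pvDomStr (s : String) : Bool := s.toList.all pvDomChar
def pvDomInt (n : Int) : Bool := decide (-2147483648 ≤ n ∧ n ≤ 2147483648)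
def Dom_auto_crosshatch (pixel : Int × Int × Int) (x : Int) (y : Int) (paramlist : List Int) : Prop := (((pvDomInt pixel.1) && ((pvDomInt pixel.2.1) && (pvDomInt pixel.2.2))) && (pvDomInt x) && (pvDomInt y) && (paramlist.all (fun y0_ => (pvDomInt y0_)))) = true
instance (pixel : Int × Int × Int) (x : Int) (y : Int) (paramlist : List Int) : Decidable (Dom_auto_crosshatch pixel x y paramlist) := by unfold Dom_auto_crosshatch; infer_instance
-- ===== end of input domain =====

-- B replaces A's threshold loop by a direct arithmetic band computation (simpler; both O(1)).

-- ===== PORT A =====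
def pvWhite : Int × Int × Int := (255, 255, 255)
def pvBlack : Int × Int × Int := (0, 0, 0)

def sum_channels (pixel : Int × Int × Int) : Int :=
  pixel.1 + pixel.2.1 + pixel.2.2

def diag_stripe (x y modulus : Int) : Int × Int × Int :=
  if PySem.Int.mod (x - PySem.Int.floordiv y 2) modulus = 0 then pvBlack else pvWhite

-- the 'for thr in thresholds' loop with its running modulus and early return
def pvLoopA (sumchan x y : Int) : List Int → Int → Int × Int × Int
  | [], _ => pvWhite
  | thr :: rest, modulus =>
      if sumchan < thr then diag_stripe x y modulus
      else pvLoopA sumchan x y rest (modulus + 2)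

def auto_crosshatch (pixel : Int × Int × Int) (x : Int) (y : Int) (paramlist : List Int) : Int × Int × Int :=
  let sumchan := sum_channels pixel
  if sumchan < 50 then pvBlack
  else pvLoopA sumchan x y [100, 150, 200, 250, 300, 350, 400, 450, 500, 550] 2

-- ===== PORT B =====
def auto_crosshatch_alt (pixel : Int × Int × Int) (x : Int) (y : Int) (paramlist : List Int) : Int × Int × Int :=
  let sumchan := pixel.1 + pixel.2.1 + pixel.2.2
  if sumchan < 50 then pvBlack
  else if sumchan ≥ 550 then pvWhite
  else diag_stripe x y (2 + 2 * PySem.Int.floordiv (sumchan - 50) 50)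

-- ===== PRECONDITION & SPEC =====
def Spec_auto_crosshatch (pixel : Int × Int × Int) (x : Int) (y : Int) (paramlist : List Int) (out : Int × Int × Int) : Prop := out = auto_crosshatch_alt pixel x y paramlist
instance (pixel : Int × Int × Int) (x : Int) (y : Int) (paramlist : List Int) (out : Int × Int × Int) : Decidable (Spec_auto_crosshatch pixel x y paramlist out) := by unfold Spec_auto_crosshatch; infer_instance

-- ===== CLAIM (what is proved, stated in full; the proofs are below) =====
def Claim_equal_auto_crosshatch : Prop := ∀ (pixel : Int × Int × Int) (x : Int) (y : Int) (paramlist : List Int), Dom_auto_crosshatch pixel x y paramlist → Spec_auto_crosshatch pixel x y paramlist (auto_crosshatch pixel x y paramlist)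

-- ===== LEMMAS AND PROOFS =====

-- band index: in the band [50 + 50k, 100 + 50k) the floor quotient is k
theorem pv_fd (s k : Int) (h1 : 50 + 50 * k ≤ s) (h2 : s < 100 + 50 * k) :
    PySem.Int.floordiv (s - 50) 50 = k := by
  rw [PySem.Int.floordiv_eq_iff_of_pos (by omega)]
  omega

-- ===== VERDICT (by name: the statement is the Claim_ definition above) =====
theorem auto_crosshatch_spec : Claim_equal_auto_crosshatch := by
  intro pixel x y paramlist _
  unfold Spec_auto_crosshatch auto_crosshatch auto_crosshatch_alt sum_channels
  set s := pixel.1 + pixel.2.1 + pixel.2.2 with hs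
  by_cases h0 : s < 50
  · simp [h0]
  · simp only [h0, if_false]
    by_cases hw : s ≥ 550
    · simp only [pvLoopA, if_neg (by omega : ¬ s < 100), if_neg (by omega : ¬ s < 150),
        if_neg (by omega : ¬ s < 200), if_neg (by omega : ¬ s < 250),
        if_neg (by omega : ¬ s < 300), if_neg (by omega : ¬ s < 350),
        if_neg (by omega : ¬ s < 400), if_neg (by omega : ¬ s < 450),
        if_neg (by omega : ¬ s < 500), if_neg (by omega : ¬ s < 550), if_pos hw]
    · simp only [if_neg hw]
      simp only [pvLoopA]
      split_ifs with c1 c2 c3 c4 c5 c6 c7 c8 c9 c10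
      · rw [pv_fd s 0 (by omega) (by omega)]; norm_num
      · rw [pv_fd s 1 (by omega) (by omega)]; norm_num
      · rw [pv_fd s 2 (by omega) (by omega)]; norm_num
      · rw [pv_fd s 3 (by omega) (by omega)]; norm_num
      · rw [pv_fd s 4 (by omega) (by omega)]; norm_num
      · rw [pv_fd s 5 (by omega) (by omega)]; norm_num
      · rw [pv_fd s 6 (by omega) (by omega)]; norm_num
      · rw [pv_fd s 7 (by omega) (by omega)]; norm_num
      · rw [pv_fd s 8 (by omega) (by omega)]; norm_num
      · rw [pv_fd s 9 (by omega) (by omega)]; norm_num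
      · omega
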